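-- pv_equiv track=rewrite | github.com/rizkiarch/yt-heatmap-clipper | run.py | build_subtitle_force_style
-- ===== SOURCE A (Python) =====
-- SUBTITLE_STYLES = {
--     "modern": (
--         "FontName=Arial,FontSize=14,Bold=1,"
--         "PrimaryColour=&HFFFFFF,OutlineColour=&H78000000,"
--         "BorderStyle=1,Outline=2,Shadow=1,Alignment=2,MarginV=50"
--     ),
--     "karaoke": (
--         "FontName=Arial,FontSize=16,Bold=1,"
--         "PrimaryColour=&H7DF9FF,OutlineColour=&H96000000,"
--         "BorderStyle=1,Outline=2,Shadow=1,Alignment=2,MarginV=50"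
--     ),
--     "minimal": (
--         "FontName=Arial,FontSize=11,Bold=0,"
--         "PrimaryColour=&HFFFFFF,OutlineColour=&H80000000,"
--         "BorderStyle=1,Outline=1,Shadow=1,Alignment=2,MarginV=30"
--     ),
--     "bold": (
--         "FontName=Impact,FontSize=20,Bold=1,"
--         "PrimaryColour=&HFFFFFF,OutlineColour=&H5A000000,"
--         "BorderStyle=1,Outline=2,Shadow=1,Alignment=2,MarginV=55"
--     ),
--     "neon": (
--         "FontName=Arial,FontSize=14,Bold=1,"
--         "PrimaryColour=&H00FF88,OutlineColour=&HFF00AA,"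
--         "BorderStyle=1,Outline=2,Shadow=1,ShadowColour=&H80FF00FF,"
--         "Alignment=2,MarginV=50"
--     ),
-- }
--
-- def clamp_int(value, minimum, maximum, default):
--     """Clamp an integer value to safe bounds."""
--     try:
--         v = int(value)
--     except Exception:
--         v = int(default)
--     return max(int(minimum), min(int(maximum), v))
--
-- def build_subtitle_force_style(style_key, font_size=None, bottom_margin=None):
--     """Build subtitle force_style string from preset + per-job overrides."""
--     base_style = SUBTITLE_STYLES.get(style_key, SUBTITLE_STYLES["modern"])
--
--     parsed = {}
--     ordered_keys = []
--     for part in base_style.split(","):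
--         entry = part.strip()
--         if not entry or "=" not in entry:
--             continue
--         key, value = entry.split("=", 1)
--         key = key.strip()
--         parsed[key] = value.strip()
--         ordered_keys.append(key)
--
--     # Values are already in render pixels (720x1280).
--     render_font = clamp_int(font_size, 12, 48, 28)
--     render_margin = clamp_int(bottom_margin, 20, 200, 72)
--
--     parsed["FontSize"] = str(render_font)
--     parsed["MarginV"] = str(render_margin)
--
--     if "FontSize" not in ordered_keys:
--         ordered_keys.append("FontSize")
--     if "MarginV" not in ordered_keys:
--         ordered_keys.append("MarginV")
--
--     return ",".join([f"{key}={parsed[key]}" for key in ordered_keys if key in parsed])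
-- ===== SOURCE B (Python) =====
-- SUBTITLE_STYLES = {
--     "modern": (
--         "FontName=Arial,FontSize=14,Bold=1,"
--         "PrimaryColour=&HFFFFFF,OutlineColour=&H78000000,"
--         "BorderStyle=1,Outline=2,Shadow=1,Alignment=2,MarginV=50"
--     ),
--     "karaoke": (
--         "FontName=Arial,FontSize=16,Bold=1,"
--         "PrimaryColour=&H7DF9FF,OutlineColour=&H96000000,"
--         "BorderStyle=1,Outline=2,Shadow=1,Alignment=2,MarginV=50"
--     ),
--     "minimal": (
--         "FontName=Arial,FontSize=11,Bold=0,"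
--         "PrimaryColour=&HFFFFFF,OutlineColour=&H80000000,"
--         "BorderStyle=1,Outline=1,Shadow=1,Alignment=2,MarginV=30"
--     ),
--     "bold": (
--         "FontName=Impact,FontSize=20,Bold=1,"
--         "PrimaryColour=&HFFFFFF,OutlineColour=&H5A000000,"
--         "BorderStyle=1,Outline=2,Shadow=1,Alignment=2,MarginV=55"
--     ),
--     "neon": (
--         "FontName=Arial,FontSize=14,Bold=1,"
--         "PrimaryColour=&H00FF88,OutlineColour=&HFF00AA,"
--         "BorderStyle=1,Outline=2,Shadow=1,ShadowColour=&H80FF00FF,"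
--         "Alignment=2,MarginV=50"
--     ),
-- }
--
--
-- def _clamp(value, lo, hi, default):
--     v = default if value is None else value
--     return max(lo, min(hi, v))
--
--
-- def build_subtitle_force_style(style_key, font_size=None, bottom_margin=None):
--     """Build subtitle force_style string from preset + per-job overrides."""
--     base = SUBTITLE_STYLES.get(style_key, SUBTITLE_STYLES["modern"])
--     font = _clamp(font_size, 12, 48, 28)
--     margin = _clamp(bottom_margin, 20, 200, 72)
--     return ",".join(
--         "FontSize=%d" % font if field.startswith("FontSize=")
--         else "MarginV=%d" % margin if field.startswith("MarginV=")
--         else field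
--         for field in base.split(",")
--     )
-- ===== Notes on version B (the rewrite author's own statement) =====
-- stated objective: simpler
-- what changed: Replaces A's parse-into-ordered-dict-and-rebuild machinery with a single pass over the comma-separated fields that substitutes the FontSize and MarginV fields in place (every preset contains both exactly once, so A's append-if-missing branches are dead).
import Mathlib
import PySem

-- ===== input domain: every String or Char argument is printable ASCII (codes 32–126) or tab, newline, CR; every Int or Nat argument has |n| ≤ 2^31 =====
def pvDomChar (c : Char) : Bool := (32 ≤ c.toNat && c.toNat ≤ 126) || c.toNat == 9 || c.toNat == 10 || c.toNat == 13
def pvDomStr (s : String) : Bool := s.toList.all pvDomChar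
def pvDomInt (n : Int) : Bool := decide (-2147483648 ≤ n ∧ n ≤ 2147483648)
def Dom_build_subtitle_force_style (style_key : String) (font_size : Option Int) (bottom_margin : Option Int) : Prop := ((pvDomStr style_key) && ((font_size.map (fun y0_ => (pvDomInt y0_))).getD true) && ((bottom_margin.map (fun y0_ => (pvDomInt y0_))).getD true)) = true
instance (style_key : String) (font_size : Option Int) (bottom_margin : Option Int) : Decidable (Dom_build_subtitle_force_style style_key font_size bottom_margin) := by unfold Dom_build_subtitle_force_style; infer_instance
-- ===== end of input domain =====

-- B rewrites A's parse-into-dict-and-rebuild machinery as a single pass over the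
-- comma-separated fields that swaps the FontSize/MarginV fields in place (simpler).

-- ===== PORT A =====

-- module constant SUBTITLE_STYLES (shared context of both implementations)
def pvStyles : PySem.Dict String String := PySem.Dict.ofList
  [ ("modern",  "FontName=Arial,FontSize=14,Bold=1,PrimaryColour=&HFFFFFF,OutlineColour=&H78000000,BorderStyle=1,Outline=2,Shadow=1,Alignment=2,MarginV=50")
  , ("karaoke", "FontName=Arial,FontSize=16,Bold=1,PrimaryColour=&H7DF9FF,OutlineColour=&H96000000,BorderStyle=1,Outline=2,Shadow=1,Alignment=2,MarginV=50")
  , ("minimal", "FontName=Arial,FontSize=11,Bold=0,PrimaryColour=&HFFFFFF,OutlineColour=&H80000000,BorderStyle=1,Outline=1,Shadow=1,Alignment=2,MarginV=30")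
  , ("bold",    "FontName=Impact,FontSize=20,Bold=1,PrimaryColour=&HFFFFFF,OutlineColour=&H5A000000,BorderStyle=1,Outline=2,Shadow=1,Alignment=2,MarginV=55")
  , ("neon",    "FontName=Arial,FontSize=14,Bold=1,PrimaryColour=&H00FF88,OutlineColour=&HFF00AA,BorderStyle=1,Outline=2,Shadow=1,ShadowColour=&H80FF00FF,Alignment=2,MarginV=50") ]

-- clamp_int(value, minimum, maximum, default): int(None) raises → default; ints pass through int() unchanged
def clamp_int (value : Option Int) (minimum maximum default : Int) : Int :=
  let v := match value with
    | some n => n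
    | none => default
  max minimum (min maximum v)

-- the body of A after base_style/render_font/render_margin are known (s1/s2 = the two rendered numbers)
def pvRebuildA (base : List Char) (s1 s2 : List Char) : List Char :=
  let st := (PySem.Chars.splitOn base [',']).foldl
    (fun (st : PySem.Dict (List Char) (List Char) × List (List Char)) part =>
      let entry := PySem.Chars.strip part
      if entry.isEmpty || !(PySem.Chars.isIn ['='] entry) then st
      else
        let pieces := PySem.Chars.splitOnMax entry ['='] 1
        let key := PySem.Chars.strip (pieces.getD 0 [])
        let value := PySem.Chars.strip (pieces.getD 1 [])
        (st.1.insert key value, st.2 ++ [key]))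
    (PySem.Dict.empty, [])
  let parsed := (st.1.insert "FontSize".toList s1).insert "MarginV".toList s2
  let ordered := if st.2.contains "FontSize".toList then st.2 else st.2 ++ ["FontSize".toList]
  let ordered := if ordered.contains "MarginV".toList then ordered else ordered ++ ["MarginV".toList]
  PySem.Chars.join [','] ((ordered.filter (fun k => parsed.contains k)).map (fun k => k ++ ['='] ++ parsed.getD k []))

def build_subtitle_force_style (style_key : String) (font_size : Option Int) (bottom_margin : Option Int) : String :=
  let base_style := pvStyles.getD style_key (pvStyles.getD "modern" "")
  let render_font := clamp_int font_size 12 48 28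
  let render_margin := clamp_int bottom_margin 20 200 72
  String.ofList (pvRebuildA base_style.toList (PySem.Int.toChars render_font) (PySem.Int.toChars render_margin))

-- ===== PORT B =====

-- _clamp(value, lo, hi, default)
def pvClampB (value : Option Int) (lo hi default : Int) : Int :=
  let v := value.getD default
  max lo (min hi v)

-- single pass: replace the FontSize/MarginV fields, keep the rest
def pvRebuildB (base : List Char) (s1 s2 : List Char) : List Char :=
  PySem.Chars.join [','] ((PySem.Chars.splitOn base [',']).map (fun f =>
    if PySem.Chars.startswith f "FontSize=".toList then "FontSize=".toList ++ s1
    else if PySem.Chars.startswith f "MarginV=".toList then "MarginV=".toList ++ s2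
    else f))

def build_subtitle_force_style_alt (style_key : String) (font_size : Option Int) (bottom_margin : Option Int) : String :=
  let base := pvStyles.getD style_key (pvStyles.getD "modern" "")
  let font := pvClampB font_size 12 48 28
  let margin := pvClampB bottom_margin 20 200 72
  String.ofList (pvRebuildB base.toList (PySem.Int.toChars font) (PySem.Int.toChars margin))

-- ===== PRECONDITION & SPEC =====
def Spec_build_subtitle_force_style (style_key : String) (font_size : Option Int) (bottom_margin : Option Int) (out : String) : Prop := out = build_subtitle_force_style_alt style_key font_size bottom_margin
instance (style_key : String) (font_size : Option Int) (bottom_margin : Option Int) (out : String) : Decidable (Spec_build_subtitle_force_style style_key font_size bottom_margin out) := by unfold Spec_build_subtitle_force_style; infer_instance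

-- ===== CLAIM (what is proved, stated in full; the proofs are below) =====
def Claim_equal_build_subtitle_force_style : Prop := ∀ (style_key : String) (font_size : Option Int) (bottom_margin : Option Int), Dom_build_subtitle_force_style style_key font_size bottom_margin → Spec_build_subtitle_force_style style_key font_size bottom_margin (build_subtitle_force_style style_key font_size bottom_margin)

-- ===== LEMMAS AND PROOFS =====

-- the same clamp, spelled two ways
theorem clamp_eq (v : Option Int) (lo hi d : Int) : clamp_int v lo hi d = pvClampB v lo hi d := by
  cases v <;> rfl

-- the lookup can only produce one of the five preset strings
theorem base_cases (sk : String) :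
    pvStyles.getD sk (pvStyles.getD "modern" "") = pvStyles.getD "modern" ""
    ∨ pvStyles.getD sk (pvStyles.getD "modern" "") = pvStyles.getD "karaoke" ""
    ∨ pvStyles.getD sk (pvStyles.getD "modern" "") = pvStyles.getD "minimal" ""
    ∨ pvStyles.getD sk (pvStyles.getD "modern" "") = pvStyles.getD "bold" ""
    ∨ pvStyles.getD sk (pvStyles.getD "modern" "") = pvStyles.getD "neon" "" := by
  by_cases h1 : sk = "modern"; · subst h1; left; rfl
  by_cases h2 : sk = "karaoke"; · subst h2; right; left; rfl
  by_cases h3 : sk = "minimal"; · subst h3; right; right; left; rfl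
  by_cases h4 : sk = "bold"; · subst h4; right; right; right; left; rfl
  by_cases h5 : sk = "neon"; · subst h5; right; right; right; right; rfl
  left
  have h1' : ("modern" == sk) = false := by simp; exact fun e => h1 e.symm
  have h2' : ("karaoke" == sk) = false := by simp; exact fun e => h2 e.symm
  have h3' : ("minimal" == sk) = false := by simp; exact fun e => h3 e.symm
  have h4' : ("bold" == sk) = false := by simp; exact fun e => h4 e.symm
  have h5' : ("neon" == sk) = false := by simp; exact fun e => h5 e.symm
  simp [pvStyles, PySem.Dict.getD, PySem.Dict.ofList, PySem.Dict.get?, PySem.Dict.update,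
        PySem.Dict.insert, PySem.Dict.empty, List.find?, h1', h2', h3', h4', h5']

set_option maxRecDepth 20000 in
theorem rebuild_modern (s1 s2 : List Char) :
    pvRebuildA ((pvStyles.getD "modern" "").toList) s1 s2
      = pvRebuildB ((pvStyles.getD "modern" "").toList) s1 s2 := rfl

set_option maxRecDepth 20000 in
theorem rebuild_karaoke (s1 s2 : List Char) :
    pvRebuildA ((pvStyles.getD "karaoke" "").toList) s1 s2
      = pvRebuildB ((pvStyles.getD "karaoke" "").toList) s1 s2 := rfl

set_option maxRecDepth 20000 in
theorem rebuild_minimal (s1 s2 : List Char) :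
    pvRebuildA ((pvStyles.getD "minimal" "").toList) s1 s2
      = pvRebuildB ((pvStyles.getD "minimal" "").toList) s1 s2 := rfl

set_option maxRecDepth 20000 in
theorem rebuild_bold (s1 s2 : List Char) :
    pvRebuildA ((pvStyles.getD "bold" "").toList) s1 s2
      = pvRebuildB ((pvStyles.getD "bold" "").toList) s1 s2 := rfl

set_option maxRecDepth 20000 in
theorem rebuild_neon (s1 s2 : List Char) :
    pvRebuildA ((pvStyles.getD "neon" "").toList) s1 s2
      = pvRebuildB ((pvStyles.getD "neon" "").toList) s1 s2 := rfl

-- ===== VERDICT (by name: the statement is the Claim_ definition above) =====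
theorem build_subtitle_force_style_spec : Claim_equal_build_subtitle_force_style := by
  intro sk fs bm _
  show build_subtitle_force_style sk fs bm = build_subtitle_force_style_alt sk fs bm
  unfold build_subtitle_force_style build_subtitle_force_style_alt
  rw [clamp_eq, clamp_eq]
  rcases base_cases sk with h | h | h | h | h <;> rw [h]
  · exact congrArg String.ofList (rebuild_modern _ _)
  · exact congrArg String.ofList (rebuild_karaoke _ _)
  · exact congrArg String.ofList (rebuild_minimal _ _)
  · exact congrArg String.ofList (rebuild_bold _ _)
  · exact congrArg String.ofList (rebuild_neon _ _)
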